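-- pv_equiv track=rewrite | github.com/0-0Jay/algorithm | Algorithm_GroupStudy/코딩테스트 기출/행복한 식물.py | solution
-- ===== SOURCE A (Python) =====
-- def solution(emotions, orders):
--     tmp = [i for i in emotions]
--     result = []
--     for i in range(len(orders)):
--         result.append(result[-1] if result else len(emotions))
--         for j in range(len(emotions)):
--             if j == orders[i] - 1 and tmp[j] > 0:
--                 tmp[j] = emotions[j]
--             else:
--                 tmp[j] -= 1
--                 if tmp[j] == 0:
--                     result[i] -= 1
--     return result
-- ===== SOURCE B (Python) =====
-- def solution(emotions, orders):
--     n = len(emotions)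
--     m = len(orders)
--     # each plant's counter evolves independently of the others: simulate it
--     # on its own timeline, record the step at which it first hits exactly 0
--     deaths = [0] * m
--     for j in range(n):
--         e = emotions[j]
--         v = e
--         for i in range(m):
--             if orders[i] - 1 == j and v > 0:
--                 v = e
--             else:
--                 v -= 1
--                 if v == 0:
--                     deaths[i] += 1
--                     break
--     result = []
--     alive = n
--     for d in deaths:
--         alive -= d
--         result.append(alive)
--     return result
-- ===== Notes on version B (the rewrite author's own statement) =====
-- stated objective: alternative
-- what changed: A simulates order-major with a shared counter array, appending a running count and decrementing it inside a nested per-plant scan; B processes each plant on its own independent timeline (with early exit at its zero-hit), records the step where its counter first hits exactly 0 in a deaths table, and produces the result by one prefix scan of that table.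
import Mathlib
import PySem

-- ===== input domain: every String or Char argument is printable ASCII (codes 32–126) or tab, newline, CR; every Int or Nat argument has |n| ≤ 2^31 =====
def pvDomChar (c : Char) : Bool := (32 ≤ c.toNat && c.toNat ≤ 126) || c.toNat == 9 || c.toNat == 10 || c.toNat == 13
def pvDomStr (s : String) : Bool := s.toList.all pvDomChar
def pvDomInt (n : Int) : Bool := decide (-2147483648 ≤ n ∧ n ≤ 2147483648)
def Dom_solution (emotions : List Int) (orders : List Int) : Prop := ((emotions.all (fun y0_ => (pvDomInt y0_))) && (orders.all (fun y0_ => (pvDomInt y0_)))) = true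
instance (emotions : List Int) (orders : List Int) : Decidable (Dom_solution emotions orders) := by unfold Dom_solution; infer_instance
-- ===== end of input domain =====

-- B replaces A's order-major nested simulation over a shared counter array by an
-- independent per-plant timeline (each plant's zero-hit step into a deaths table,
-- then one prefix scan); alternative algorithm, same worst-case cost.

-- ===== PORT A =====
-- inner loop body: one plant j at order o (tmp, running count)
def innerBody (emotions : List Int) (o : Int) (p : List Int × Int) (j : Nat) : List Int × Int :=
  let tj := p.1.getD j 0
  if (j : Int) = o - 1 ∧ tj > 0 then
    (p.1.set j (emotions.getD j 0), p.2)
  else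
    (p.1.set j (tj - 1), if tj - 1 = 0 then p.2 - 1 else p.2)

-- outer loop body: one order o (tmp, reversed result list)
def outerBody (emotions : List Int) (st : List Int × List Int) (o : Int) : List Int × List Int :=
  let start : Int := match st.2 with | [] => (emotions.length : Int) | x :: _ => x
  let p := (List.range emotions.length).foldl (innerBody emotions o) (st.1, start)
  (p.1, p.2 :: st.2)

def solution (emotions : List Int) (orders : List Int) : List Int :=
  (orders.foldl (outerBody emotions) (emotions, ([] : List Int))).2.reverse

-- ===== PORT B =====
-- scan this plant's own timeline; `some i` = the step where its counter first hits 0 (the Python `break`)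
def deathScan (e : Int) (j : Nat) (v : Int) (i : Nat) : List Int → Option Nat
  | [] => none
  | o :: rest =>
      if o - 1 = (j : Int) ∧ v > 0 then deathScan e j e (i + 1) rest
      else if v - 1 = 0 then some (i)
      else deathScan e j (v - 1) (i + 1) rest

-- record plant j's death step in the deaths table
def deathAcc (emotions orders : List Int) (d : List Int) (j : Nat) : List Int :=
  match deathScan (emotions.getD j 0) j (emotions.getD j 0) 0 orders with
  | some i => d.set i (d.getD i 0 + 1)
  | none => d

def solution_alt (emotions : List Int) (orders : List Int) : List Int :=
  let deaths := (List.range emotions.length).foldl (deathAcc emotions orders)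
      (List.replicate orders.length (0 : Int))
  let fin := deaths.foldl (fun (p : Int × List Int) d => (p.1 - d, (p.1 - d) :: p.2))
      ((emotions.length : Int), ([] : List Int))
  fin.2.reverse

-- ===== PRECONDITION & SPEC =====
def Spec_solution (emotions : List Int) (orders : List Int) (out : List Int) : Prop := out = solution_alt emotions orders
instance (emotions : List Int) (orders : List Int) (out : List Int) : Decidable (Spec_solution emotions orders out) := by unfold Spec_solution; infer_instance

-- ===== CLAIM (what is proved, stated in full; the proofs are below) =====
def Claim_equal_solution : Prop := ∀ (emotions : List Int) (orders : List Int), Dom_solution emotions orders → Spec_solution emotions orders (solution emotions orders)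

-- ===== LEMMAS AND PROOFS =====

-- initial value of plant j
def eV (emotions : List Int) (j : Nat) : Int := emotions.getD j 0

-- one step of plant j's counter at order o
def pstep (e o v : Int) (j : Nat) : Int := if (j : Int) = o - 1 ∧ v > 0 then e else v - 1

-- does plant j's counter hit exactly 0 at this step?
def pkill (e o v : Int) (j : Nat) : Bool := if (j : Int) = o - 1 ∧ v > 0 then false else decide (v - 1 = 0)

-- plant j's counter after the orders os
def runV (emotions : List Int) (j : Nat) (os : List Int) : Int :=
  os.foldl (fun v o => pstep (eV emotions j) o v j) (eV emotions j)

-- number of plants hitting 0 at the order o following prefix os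
def zAt (emotions : List Int) (os : List Int) (o : Int) : Nat :=
  (List.range emotions.length).countP (fun j => pkill (eV emotions j) o (runV emotions j os) j)

-- per-step kill counts for the prefix p
def zlistP (emotions p : List Int) : List Nat :=
  (List.range p.length).map (fun t => zAt emotions (p.take t) (p.getD t 0))

-- alive count reported at step i
def aliveAt (emotions p : List Int) (i : Nat) : Int :=
  (emotions.length : Int) - (((zlistP emotions p).take (i + 1)).sum : Nat)

def tmpOf (emotions p : List Int) : List Int :=
  (List.range emotions.length).map (fun j => runV emotions j p)

def ansRev (emotions p : List Int) : List Int :=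
  ((List.range p.length).map (fun i => aliveAt emotions p i)).reverse

lemma self_eq_range_map (tmp : List Int) :
    (List.range tmp.length).map (fun j => tmp.getD j 0) = tmp := by
  apply List.ext_getElem
  · simp
  · intro i h1 h2
    simp [List.getD, List.getElem?_eq_getElem h2]

lemma getD_range_map (n k : Nat) (f : Nat → Int) (hk : k < n) :
    ((List.range n).map f).getD k 0 = f k := by
  rw [List.getD_eq_getElem _ 0 (by simpa using hk)]
  simp

lemma set_range_map (n k : Nat) (f : Nat → Int) (x : Int) (hk : k < n) :
    ((List.range n).map f).set k x = (List.range n).map (fun j => if j = k then x else f j) := by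
  apply List.ext_getElem
  · simp
  · intro i h1 h2
    simp only [List.getElem_set, List.getElem_map, List.getElem_range]
    by_cases h : k = i <;> simp [h, eq_comm]

lemma inner_spec (emotions : List Int) (o : Int) :
    ∀ (k : Nat) (tmp : List Int) (c : Int), tmp.length = emotions.length → k ≤ emotions.length →
    (List.range k).foldl (innerBody emotions o) (tmp, c) =
      ((List.range emotions.length).map
        (fun j => if j < k then pstep (eV emotions j) o (tmp.getD j 0) j else tmp.getD j 0),
       c - (((List.range k).countP (fun j => pkill (eV emotions j) o (tmp.getD j 0) j) : Nat) : Int)) := by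
  intro k
  induction k with
  | zero =>
    intro tmp c hlen _
    simp only [List.range_zero, List.foldl_nil, List.countP_nil, Nat.cast_zero, sub_zero]
    congr 1
    conv_lhs => rw [← self_eq_range_map tmp]
    rw [hlen]
    simp
  | succ k ih =>
    intro tmp c hlen hk
    have hk' : k ≤ emotions.length := Nat.le_of_succ_le hk
    have hklt : k < emotions.length := hk
    rw [List.range_succ, List.foldl_append, ih tmp c hlen hk']
    simp only [List.foldl_cons, List.foldl_nil]
    have hget : ((List.range emotions.length).map
        (fun j => if j < k then pstep (eV emotions j) o (tmp.getD j 0) j else tmp.getD j 0)).getD k 0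
        = tmp.getD k 0 := by
      rw [getD_range_map _ _ _ hklt]; simp
    unfold innerBody
    simp only [hget]
    by_cases hcond : (k : Int) = o - 1 ∧ tmp.getD k 0 > 0
    · have hkill : pkill (eV emotions k) o (tmp.getD k 0) k = false := by
        simp only [pkill]
        rw [if_pos hcond]
      rw [if_pos hcond]
      congr 1
      · rw [set_range_map _ _ _ _ hklt]
        apply List.map_congr_left
        intro j hj
        rw [List.mem_range] at hj
        by_cases hjk : j = k
        · subst hjk
          rw [if_pos rfl, if_pos (Nat.lt_succ_self j)]
          unfold pstep eV
          rw [if_pos hcond]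
        · rw [if_neg hjk]
          by_cases hjlt : j < k
          · have h2 : j < k + 1 := by omega
            rw [if_pos hjlt, if_pos h2]
          · have h2 : ¬ j < k + 1 := by omega
            rw [if_neg hjlt, if_neg h2]
      · simp only [List.countP_append, List.countP_cons, List.countP_nil, hkill]
        simp
    · have hkill : pkill (eV emotions k) o (tmp.getD k 0) k = decide (tmp.getD k 0 - 1 = 0) := by
        simp only [pkill]
        rw [if_neg hcond]
      rw [if_neg hcond]
      congr 1
      · rw [set_range_map _ _ _ _ hklt]
        apply List.map_congr_left
        intro j hj
        rw [List.mem_range] at hj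
        by_cases hjk : j = k
        · subst hjk
          rw [if_pos rfl, if_pos (Nat.lt_succ_self j)]
          unfold pstep eV
          rw [if_neg hcond]
        · rw [if_neg hjk]
          by_cases hjlt : j < k
          · have h2 : j < k + 1 := by omega
            rw [if_pos hjlt, if_pos h2]
          · have h2 : ¬ j < k + 1 := by omega
            rw [if_neg hjlt, if_neg h2]
      · simp only [List.countP_append, List.countP_cons, List.countP_nil, hkill]
        by_cases hz : tmp.getD k 0 - 1 = 0 <;> simp [hz] <;> omega

lemma zlistP_snoc (emotions p : List Int) (o : Int) :
    zlistP emotions (p ++ [o]) = zlistP emotions p ++ [zAt emotions p o] := by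
  unfold zlistP
  rw [List.length_append, List.length_singleton, List.range_succ, List.map_append]
  congr 1
  · apply List.map_congr_left
    intro t ht
    rw [List.mem_range] at ht
    rw [List.take_append_of_le_length (by omega), List.getD_append _ _ _ _ (by omega)]
  · simp

lemma aliveAt_snoc (emotions p : List Int) (o : Int) (i : Nat) (hi : i < p.length) :
    aliveAt emotions (p ++ [o]) i = aliveAt emotions p i := by
  unfold aliveAt
  rw [zlistP_snoc]
  rw [List.take_append_of_le_length (by simpa [zlistP] using hi)]

lemma ansRev_snoc (emotions p : List Int) (o : Int) :
    ansRev emotions (p ++ [o]) = aliveAt emotions (p ++ [o]) p.length :: ansRev emotions p := by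
  unfold ansRev
  rw [List.length_append, List.length_singleton, List.range_succ, List.map_append,
    List.reverse_append]
  simp only [List.map_cons, List.map_nil, List.reverse_cons, List.reverse_nil, List.nil_append,
    List.singleton_append]
  congr 1
  apply congrArg
  apply List.map_congr_left
  intro i hi
  rw [List.mem_range] at hi
  exact aliveAt_snoc emotions p o i hi

lemma zlistP_length (emotions p : List Int) : (zlistP emotions p).length = p.length := by
  simp [zlistP]

lemma ansRev_head (emotions p : List Int) :
    (match ansRev emotions p with
     | [] => (emotions.length : Int)
     | x :: _ => x) = (emotions.length : Int) - ((zlistP emotions p).sum : Nat) := by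
  rcases hp : p.length with _ | q
  · have : p = [] := List.eq_nil_of_length_eq_zero hp
    subst this
    simp [ansRev, zlistP]
  · have h1 : ansRev emotions p = aliveAt emotions p q ::
        ((List.range q).map (fun i => aliveAt emotions p i)).reverse := by
      unfold ansRev
      rw [hp, List.range_succ, List.map_append, List.reverse_append]
      simp
    rw [h1]
    unfold aliveAt
    have : q + 1 = (zlistP emotions p).length := by rw [zlistP_length, hp]
    rw [this, List.take_length]

lemma runV_snoc (emotions : List Int) (j : Nat) (p : List Int) (o : Int) :
    runV emotions j (p ++ [o]) = pstep (eV emotions j) o (runV emotions j p) j := by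
  unfold runV
  rw [List.foldl_append]
  simp

lemma outer_step (emotions p : List Int) (o : Int) :
    outerBody emotions (tmpOf emotions p, ansRev emotions p) o =
      (tmpOf emotions (p ++ [o]), ansRev emotions (p ++ [o])) := by
  have hlen : (tmpOf emotions p).length = emotions.length := by simp [tmpOf]
  simp only [outerBody]
  rw [inner_spec emotions o emotions.length (tmpOf emotions p) _ hlen (le_refl _)]
  dsimp only
  have hgd : ∀ j ∈ List.range emotions.length,
      (tmpOf emotions p).getD j 0 = runV emotions j p := by
    intro j hj
    rw [List.mem_range] at hj
    exact getD_range_map _ _ _ hj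
  congr 1
  · unfold tmpOf
    apply List.map_congr_left
    intro j hj
    rw [List.mem_range] at hj
    rw [getD_range_map _ _ _ hj, runV_snoc]
    simp [hj]
  · rw [ansRev_snoc]
    have hcnt : (List.range emotions.length).countP
        (fun j => pkill (eV emotions j) o ((tmpOf emotions p).getD j 0) j) = zAt emotions p o := by
      unfold zAt
      apply List.countP_congr
      intro j hj
      rw [hgd j hj]
    rw [ansRev_head, hcnt]
    unfold aliveAt
    rw [zlistP_snoc]
    have hl : (zlistP emotions p ++ [zAt emotions p o]).length = p.length + 1 := by
      simp [zlistP_length]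
    rw [← hl, List.take_length, List.sum_append]
    simp only [List.sum_cons, List.sum_nil, add_zero]
    push_cast
    ring

lemma outer_all (emotions : List Int) :
    ∀ (rest p : List Int),
      rest.foldl (outerBody emotions) (tmpOf emotions p, ansRev emotions p) =
        (tmpOf emotions (p ++ rest), ansRev emotions (p ++ rest)) := by
  intro rest
  induction rest with
  | nil => intro p; simp
  | cons o r ih =>
    intro p
    rw [List.foldl_cons, outer_step, ih (p ++ [o])]
    simp

theorem thmA (emotions orders : List Int) :
    solution emotions orders = (List.range orders.length).map (fun i => aliveAt emotions orders i) := by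
  unfold solution
  have h0 : (emotions, ([] : List Int)) = (tmpOf emotions [], ansRev emotions []) := by
    have h1 : tmpOf emotions [] = emotions := by
      unfold tmpOf runV
      simp only [List.foldl_nil]
      exact self_eq_range_map emotions
    rw [h1]
    simp [ansRev]
  rw [h0, outer_all emotions orders []]
  simp [ansRev]


-- ===== B-SIDE CHARACTERISATION =====

-- plant j's per-step kill flags along its own timeline
def killSeq (e : Int) (j : Nat) (v : Int) : List Int → List Bool
  | [] => []
  | o :: r => pkill e o v j :: killSeq e j (pstep e o v j) r

def deltaJ (emotions orders : List Int) (j : Nat) : Option Nat :=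
  List.findIdx? (fun b => b) (killSeq (eV emotions j) j (eV emotions j) orders)

lemma killSeq_length (e : Int) (j : Nat) :
    ∀ (os : List Int) (v : Int), (killSeq e j v os).length = os.length := by
  intro os
  induction os with
  | nil => intro v; rfl
  | cons o r ih => intro v; simp [killSeq, ih]

lemma pkill_of_cond (e o v : Int) (j : Nat) (h : (j : Int) = o - 1 ∧ v > 0) :
    pkill e o v j = false := by
  simp only [pkill]; rw [if_pos h]

lemma pkill_of_not_cond (e o v : Int) (j : Nat) (h : ¬((j : Int) = o - 1 ∧ v > 0)) :
    pkill e o v j = decide (v - 1 = 0) := by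
  simp only [pkill]; rw [if_neg h]

lemma pstep_of_cond (e o v : Int) (j : Nat) (h : (j : Int) = o - 1 ∧ v > 0) :
    pstep e o v j = e := by
  simp only [pstep]; rw [if_pos h]

lemma pstep_of_not_cond (e o v : Int) (j : Nat) (h : ¬((j : Int) = o - 1 ∧ v > 0)) :
    pstep e o v j = v - 1 := by
  simp only [pstep]; rw [if_neg h]

lemma deathScan_eq (e : Int) (j : Nat) :
    ∀ (os : List Int) (v : Int) (i : Nat),
      deathScan e j v i os = (List.findIdx? (fun b => b) (killSeq e j v os)).map (i + ·) := by
  intro os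
  induction os with
  | nil => intro v i; rfl
  | cons o r ih =>
    intro v i
    simp only [deathScan, killSeq]
    by_cases hc : (j : Int) = o - 1 ∧ v > 0
    · have hc' : o - 1 = (j : Int) ∧ v > 0 := ⟨hc.1.symm, hc.2⟩
      rw [if_pos hc', pkill_of_cond e o v j hc, pstep_of_cond e o v j hc, ih e (i + 1),
        List.findIdx?_cons]
      simp only [Bool.false_eq_true, if_false]
      cases h : List.findIdx? (fun b => b) (killSeq e j e r) <;> simp [h] <;> omega
    · have hc' : ¬(o - 1 = (j : Int) ∧ v > 0) := fun h => hc ⟨h.1.symm, h.2⟩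
      rw [if_neg hc', pkill_of_not_cond e o v j hc, pstep_of_not_cond e o v j hc,
        List.findIdx?_cons]
      by_cases hz : v - 1 = 0
      · rw [if_pos hz]
        simp [hz]
      · rw [if_neg hz, ih (v - 1) (i + 1)]
        simp only [hz, decide_false, Bool.false_eq_true, if_false]
        cases h : List.findIdx? (fun b => b) (killSeq e j (v - 1) r) <;> simp [h] <;> omega

lemma killSeq_nonpos (e : Int) (j : Nat) :
    ∀ (os : List Int) (v : Int), v ≤ 0 → killSeq e j v os = List.replicate os.length false := by
  intro os
  induction os with
  | nil => intro v _; rfl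
  | cons o r ih =>
    intro v hv
    have hc : ¬((j : Int) = o - 1 ∧ v > 0) := fun h => absurd h.2 (by omega)
    have h1 : pkill e o v j = false := by
      rw [pkill_of_not_cond e o v j hc]
      simp only [decide_eq_false_iff_not]
      omega
    simp only [killSeq, List.length_cons, List.replicate_succ, h1,
      pstep_of_not_cond e o v j hc]
    rw [ih (v - 1) (by omega)]

lemma killSeq_getD (e : Int) (j : Nat) :
    ∀ (os : List Int) (v : Int) (t : Nat), t < os.length →
      (killSeq e j v os).getD t false =
        pkill e (os.getD t 0) ((os.take t).foldl (fun v o => pstep e o v j) v) j := by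
  intro os
  induction os with
  | nil => intro v t ht; simp at ht
  | cons o r ih =>
    intro v t ht
    cases t with
    | zero => simp [killSeq]
    | succ s =>
      simp only [killSeq, List.getD_cons_succ, List.take_succ_cons, List.foldl_cons]
      exact ih (pstep e o v j) s (by simpa using ht)

lemma killSeq_first (e : Int) (j : Nat) :
    ∀ (os : List Int) (v : Int) (t : Nat), (killSeq e j v os).getD t false = true →
      List.findIdx? (fun b => b) (killSeq e j v os) = some t := by
  intro os
  induction os with
  | nil => intro v t ht; simp [killSeq] at ht
  | cons o r ih =>
    intro v t ht
    simp only [killSeq] at ht ⊢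
    cases t with
    | zero =>
      simp only [List.getD_cons_zero] at ht
      rw [List.findIdx?_cons, ht]
      rfl
    | succ s =>
      simp only [List.getD_cons_succ] at ht
      have hb : pkill e o v j = false := by
        by_contra hb'
        have hb2 : pkill e o v j = true := by
          cases h : pkill e o v j
          · exact absurd h hb'
          · rfl
        have hc : ¬((j : Int) = o - 1 ∧ v > 0) := by
          intro h
          rw [pkill_of_cond e o v j h] at hb2
          exact Bool.false_ne_true hb2
        have hz : v - 1 = 0 := by
          rw [pkill_of_not_cond e o v j hc] at hb2
          simpa using hb2
        rw [pstep_of_not_cond e o v j hc, hz] at ht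
        rw [killSeq_nonpos e j r 0 (le_refl 0)] at ht
        rcases Nat.lt_or_ge s r.length with h | h
        · rw [List.getD_eq_getElem _ false (by simpa using h)] at ht
          simp at ht
        · rw [List.getD_eq_default _ false (by simpa using h)] at ht
          exact Bool.false_ne_true ht
      rw [List.findIdx?_cons, hb]
      simp only [Bool.false_eq_true, if_false]
      rw [ih (pstep e o v j) s ht]
      rfl

lemma findIdx?_id_spec :
    ∀ (l : List Bool) (t : Nat), List.findIdx? (fun b => b) l = some t →
      t < l.length ∧ l.getD t false = true := by
  intro l
  induction l with
  | nil => intro t h; simp at h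
  | cons b r ih =>
    intro t h
    rw [List.findIdx?_cons] at h
    cases hb : b
    · rw [hb] at h
      simp only [Bool.false_eq_true, if_false] at h
      cases h2 : List.findIdx? (fun b => b) r with
      | none => rw [h2] at h; simp at h
      | some s =>
        rw [h2] at h
        simp only [Option.map_some] at h
        obtain ⟨hs1, hs2⟩ := ih s h2
        cases h
        exact ⟨by simpa using hs1, by simpa using hs2⟩
    · rw [hb] at h
      simp only [if_true] at h
      cases h
      exact ⟨by simp, by simp [hb]⟩

lemma deathScan_deltaJ (emotions orders : List Int) (j : Nat) :
    deathScan (emotions.getD j 0) j (emotions.getD j 0) 0 orders = deltaJ emotions orders j := by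
  rw [deathScan_eq]
  unfold deltaJ eV
  cases h : List.findIdx? (fun b => b) (killSeq (emotions.getD j 0) j (emotions.getD j 0) orders) <;>
    simp [h]

lemma getD_set_int (d : List Int) (i t : Nat) (x : Int) :
    (d.set i x).getD t 0 = if t = i ∧ i < d.length then x else d.getD t 0 := by
  by_cases h1 : t < d.length
  · rw [List.getD_eq_getElem _ 0 (by simpa using h1), List.getElem_set,
      List.getD_eq_getElem _ 0 h1]
    by_cases h2 : i = t
    · subst h2
      simp [h1]
    · rw [if_neg h2, if_neg (fun h => h2 h.1.symm)]
  · rw [List.getD_eq_default _ 0 (by simpa using h1),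
      List.getD_eq_default _ 0 (by omega)]
    rw [if_neg (fun h => h1 (by omega))]

lemma deaths_fold (emotions orders : List Int) :
    ∀ (js : List Nat) (d : List Int), d.length = orders.length →
      ((js.foldl (deathAcc emotions orders) d).length = d.length ∧
       ∀ t : Nat, (js.foldl (deathAcc emotions orders) d).getD t 0 =
         d.getD t 0 + ((js.countP (fun j => deltaJ emotions orders j = some t)) : Nat)) := by
  intro js
  induction js with
  | nil => intro d _; simp
  | cons j js ih =>
    intro d hd
    rw [List.foldl_cons]
    have hacc : deathAcc emotions orders d j =
        match deltaJ emotions orders j with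
        | some i => d.set i (d.getD i 0 + 1)
        | none => d := by
      unfold deathAcc
      rw [deathScan_deltaJ]
    cases hδ : deltaJ emotions orders j with
    | none =>
      rw [hδ] at hacc
      rw [hacc]
      obtain ⟨hl, hv⟩ := ih d hd
      refine ⟨hl, fun t => ?_⟩
      rw [hv t, List.countP_cons]
      simp [hδ]
    | some i =>
      rw [hδ] at hacc
      rw [hacc]
      have hi : i < orders.length := by
        have := (findIdx?_id_spec _ i hδ).1
        rwa [killSeq_length] at this
      have hlen' : (d.set i (d.getD i 0 + 1)).length = orders.length := by
        simpa using hd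
      obtain ⟨hl, hv⟩ := ih _ hlen'
      refine ⟨by simpa using hl, fun t => ?_⟩
      rw [hv t, getD_set_int, List.countP_cons]
      by_cases hti : t = i
      · subst hti
        rw [if_pos ⟨rfl, by omega⟩]
        simp [hδ]
        omega
      · rw [if_neg (fun h => hti h.1)]
        have hne : ¬(i = t) := fun h => hti h.symm
        simp [hδ, hne]

lemma getD_range_map' (n k : Nat) (f : Nat → Nat) (hk : k < n) :
    ((List.range n).map f).getD k 0 = f k := by
  rw [List.getD_eq_getElem _ 0 (by simpa using hk)]
  simp

lemma deaths_eq (emotions orders : List Int) :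
    (List.range emotions.length).foldl (deathAcc emotions orders)
        (List.replicate orders.length (0 : Int)) =
      (zlistP emotions orders).map (fun z : Nat => (z : Int)) := by
  obtain ⟨hl, hv⟩ := deaths_fold emotions orders (List.range emotions.length)
    (List.replicate orders.length (0 : Int)) (by simp)
  apply List.ext_getElem
  · rw [hl]
    simp [zlistP_length]
  · intro t h1 h2
    have ht : t < orders.length := by
      simpa [zlistP_length] using h2
    rw [← List.getD_eq_getElem _ 0 h1, ← List.getD_eq_getElem _ 0 h2, hv t]
    have hrep : (List.replicate orders.length (0 : Int)).getD t 0 = 0 := by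
      rw [List.getD_eq_getElem _ 0 (by simpa using ht)]
      simp
    rw [hrep, zero_add]
    have hmap : ((zlistP emotions orders).map (fun z : Nat => (z : Int))).getD t 0 =
        ((zlistP emotions orders).getD t 0 : Int) := by
      rw [List.getD_eq_getElem _ 0 h2,
        List.getD_eq_getElem _ 0 (by simpa [zlistP_length] using ht)]
      simp
    rw [hmap]
    have hz : (zlistP emotions orders).getD t 0 =
        zAt emotions (orders.take t) (orders.getD t 0) := by
      unfold zlistP
      rw [getD_range_map' _ _ _ ht]
    rw [hz]
    have hcnt : (List.range emotions.length).countP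
        (fun j => deltaJ emotions orders j = some t) =
        zAt emotions (orders.take t) (orders.getD t 0) := by
      unfold zAt
      apply List.countP_congr
      intro j hj
      have hiff : deltaJ emotions orders j = some t ↔
          pkill (eV emotions j) (orders.getD t 0) (runV emotions j (orders.take t)) j = true := by
        constructor
        · intro h
          obtain ⟨hlt, hgd⟩ := findIdx?_id_spec _ t h
          rw [killSeq_getD (eV emotions j) j orders (eV emotions j) t ht] at hgd
          exact hgd
        · intro h
          unfold deltaJ
          apply killSeq_first
          rw [killSeq_getD (eV emotions j) j orders (eV emotions j) t ht]
          exact h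
      simp only [decide_eq_true_eq]
      exact hiff
    rw [hcnt]

lemma alive_fold :
    ∀ (ds : List Int) (a : Int) (acc : List Int),
      ds.foldl (fun (p : Int × List Int) d => (p.1 - d, (p.1 - d) :: p.2)) (a, acc) =
        (a - ds.sum,
         ((List.range ds.length).map (fun i => a - (ds.take (i + 1)).sum)).reverse ++ acc) := by
  intro ds
  induction ds with
  | nil => intro a acc; simp
  | cons d r ih =>
    intro a acc
    rw [List.foldl_cons]
    rw [show (a - d, (a - d) :: acc) = ((a - d : Int), (a - d) :: acc) from rfl]
    rw [ih (a - d) ((a - d) :: acc)]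
    congr 1
    · rw [List.sum_cons]; ring
    · rw [List.length_cons, List.range_succ_eq_map, List.map_cons, List.map_map,
        List.reverse_cons, List.append_assoc]
      simp only [List.take_succ_cons, List.take_zero, List.sum_cons, List.sum_nil, add_zero,
        List.singleton_append]
      congr 1
      apply congrArg
      apply List.map_congr_left
      intro i hi
      simp only [Function.comp_apply, List.take_succ_cons, List.sum_cons]
      ring

theorem thmB (emotions orders : List Int) :
    solution_alt emotions orders =
      (List.range orders.length).map (fun i => aliveAt emotions orders i) := by
  simp only [solution_alt]
  rw [deaths_eq, alive_fold]
  dsimp only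
  rw [List.append_nil, List.reverse_reverse]
  have hlen : ((zlistP emotions orders).map (fun z : Nat => (z : Int))).length = orders.length := by
    simp [zlistP_length]
  rw [hlen]
  apply List.map_congr_left
  intro i hi
  rw [List.mem_range] at hi
  unfold aliveAt
  rw [← List.map_take, ← Nat.cast_list_sum]

-- ===== VERDICT (by name: the statement is the Claim_ definition above) =====
theorem solution_spec : Claim_equal_solution := by
  intro emotions orders _
  unfold Spec_solution
  rw [thmA, thmB]
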